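-- pv_equiv track=rewrite | github.com/n-pham/dsa | advent_of_code_2025/main.py | sum_math_problems
-- ===== SOURCE A (Python) =====
-- def sum_math_problems(number_lines: list[list[int]], operands: list[str]) -> int:
--     result = 0
--     for i, operand in enumerate(operands):
--         if operand == "+":
--             addition_result = 0
--             for line in number_lines:
--                 addition_result += line[i]
--             result += addition_result
--         else:
--             multiply_result = 1
--             for line in number_lines:
--                 multiply_result *= line[i]
--             result += multiply_result
--     return result
-- ===== SOURCE B (Python) =====
-- def sum_math_problems(number_lines: list[list[int]], operands: list[str]) -> int:
--     acc = [0 if op == "+" else 1 for op in operands]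
--     for line in number_lines:
--         for i, op in enumerate(operands):
--             if op == "+":
--                 acc[i] += line[i]
--             else:
--                 acc[i] *= line[i]
--     return sum(acc)
-- ===== Notes on version B (the rewrite author's own statement) =====
-- stated objective: alternative
-- what changed: Interchanged the loop nest: instead of one pass over all rows per operand (columns outer), B keeps a vector of per-column partial results initialised to the operand's identity, scans the data row-major once, and returns the vector's sum.
import Mathlib
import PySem

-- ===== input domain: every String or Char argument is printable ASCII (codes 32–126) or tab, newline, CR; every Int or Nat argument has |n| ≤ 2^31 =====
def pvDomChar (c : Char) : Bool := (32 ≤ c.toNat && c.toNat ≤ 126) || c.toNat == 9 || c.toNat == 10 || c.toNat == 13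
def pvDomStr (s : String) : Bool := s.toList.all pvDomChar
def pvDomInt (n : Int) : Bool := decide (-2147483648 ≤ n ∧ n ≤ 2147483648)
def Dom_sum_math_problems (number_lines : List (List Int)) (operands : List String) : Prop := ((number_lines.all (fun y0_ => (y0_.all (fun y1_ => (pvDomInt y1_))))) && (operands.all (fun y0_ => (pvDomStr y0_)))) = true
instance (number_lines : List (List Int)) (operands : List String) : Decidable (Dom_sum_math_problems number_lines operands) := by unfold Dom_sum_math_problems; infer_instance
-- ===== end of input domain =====

-- B interchanges the loop nest: a row-major single scan maintaining a per-column accumulator vector, instead of A's one full pass over the rows per operand (alternative decomposition, same cost).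

-- ===== PORT A =====
-- column-outer: for each (i, operand), a dedicated pass over number_lines
def sum_math_problems (number_lines : List (List Int)) (operands : List String) : Int :=
  (PySem.List.enumerate operands 0).foldl (fun result p =>
    if p.2 == "+" then
      result + number_lines.foldl (fun a line => a + (PySem.List.pyGet? line p.1).getD 0) 0
    else
      result + number_lines.foldl (fun m line => m * (PySem.List.pyGet? line p.1).getD 0) 1) 0

-- ===== PORT B =====
-- row-major: one scan over number_lines updating a vector acc of per-column partials
def sum_math_problems_alt (number_lines : List (List Int)) (operands : List String) : Int :=
  let acc0 : List Int := operands.map (fun op => if op == "+" then (0 : Int) else 1)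
  let acc := number_lines.foldl (fun acc line =>
    (PySem.List.enumerate operands 0).map (fun p =>
      if p.2 == "+" then
        (PySem.List.pyGet? acc p.1).getD 0 + (PySem.List.pyGet? line p.1).getD 0
      else
        (PySem.List.pyGet? acc p.1).getD 0 * (PySem.List.pyGet? line p.1).getD 0)) acc0
  acc.sum

-- ===== PRECONDITION & SPEC =====
-- Pre_ excludes exactly the inputs where the Pythons raise IndexError: some row shorter than operands.
def Pre_sum_math_problems (number_lines : List (List Int)) (operands : List String) : Prop :=
  ∀ line ∈ number_lines, operands.length ≤ line.length
instance (number_lines : List (List Int)) (operands : List String) : Decidable (Pre_sum_math_problems number_lines operands) := by unfold Pre_sum_math_problems; infer_instance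
def pvWitness_sum_math_problems : List (List Int) × List String := ([[1, 2], [3, 4]], ["+", "*"])

def Spec_sum_math_problems (number_lines : List (List Int)) (operands : List String) (out : Int) : Prop := out = sum_math_problems_alt number_lines operands
instance (number_lines : List (List Int)) (operands : List String) (out : Int) : Decidable (Spec_sum_math_problems number_lines operands out) := by unfold Spec_sum_math_problems; infer_instance

-- ===== CLAIM (what is proved, stated in full; the proofs are below) =====
def Claim_equal_sum_math_problems : Prop := ∀ (number_lines : List (List Int)) (operands : List String), Dom_sum_math_problems number_lines operands → Pre_sum_math_problems number_lines operands → Spec_sum_math_problems number_lines operands (sum_math_problems number_lines operands)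

-- ===== LEMMAS AND PROOFS =====

-- the result A computes for column i under operand op
def colF (number_lines : List (List Int)) (i : Int) (op : String) : Int :=
  if op == "+" then number_lines.foldl (fun a line => a + (PySem.List.pyGet? line i).getD 0) 0
  else number_lines.foldl (fun m line => m * (PySem.List.pyGet? line i).getD 0) 1

theorem colF_nil (i : Int) (op : String) :
    colF [] i op = (if op == "+" then (0 : Int) else 1) := by
  unfold colF; split <;> rfl

theorem colF_snoc (pre : List (List Int)) (line : List Int) (i : Int) (op : String) :
    colF (pre ++ [line]) i op =
      (if op == "+" then colF pre i op + (PySem.List.pyGet? line i).getD 0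
       else colF pre i op * (PySem.List.pyGet? line i).getD 0) := by
  unfold colF; split <;> simp [List.foldl_append]

-- indexing the accumulator vector (a map over enumerate) at its own index p.1
theorem pyGet_map_enumerate (operands : List String) (g : Int × String → Int)
    (k : Nat) (hk : k < operands.length) :
    (PySem.List.pyGet? ((PySem.List.enumerate operands 0).map g) ((k : Int))).getD 0
      = g ((k : Int), operands[k]) := by
  rw [PySem.List.pyGet?_natCast]
  rw [List.getElem?_map]
  have h1 : (PySem.List.enumerate operands 0)[k]? = some ((0 + (k : Int)), operands[k]) := by
    rw [PySem.List.getElem?_enumerate]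
    simp [List.getElem?_eq_getElem hk]
  rw [h1]
  simp

-- the alt's row step maps the vector of prefix partials to the vector for prefix ++ [line]
theorem step_snoc (operands : List String) (pre : List (List Int)) (line : List Int) :
    (PySem.List.enumerate operands 0).map (fun p =>
      if p.2 == "+" then
        (PySem.List.pyGet? ((PySem.List.enumerate operands 0).map (fun q => colF pre q.1 q.2)) p.1).getD 0
          + (PySem.List.pyGet? line p.1).getD 0
      else
        (PySem.List.pyGet? ((PySem.List.enumerate operands 0).map (fun q => colF pre q.1 q.2)) p.1).getD 0
          * (PySem.List.pyGet? line p.1).getD 0)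
    = (PySem.List.enumerate operands 0).map (fun p => colF (pre ++ [line]) p.1 p.2) := by
  apply List.map_congr_left
  intro p hp
  rcases (PySem.List.mem_enumerate_iff _ _ _).1 hp with ⟨k, hk, rfl⟩
  simp only [colF_snoc]
  have := pyGet_map_enumerate operands (fun q => colF pre q.1 q.2) k hk
  simp only [zero_add] at this ⊢
  rw [this]

theorem foldl_step_inv (operands : List String) (rest : List (List Int)) :
    ∀ pre : List (List Int),
    rest.foldl (fun acc line =>
      (PySem.List.enumerate operands 0).map (fun p =>
        if p.2 == "+" then
          (PySem.List.pyGet? acc p.1).getD 0 + (PySem.List.pyGet? line p.1).getD 0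
        else
          (PySem.List.pyGet? acc p.1).getD 0 * (PySem.List.pyGet? line p.1).getD 0))
      ((PySem.List.enumerate operands 0).map (fun p => colF pre p.1 p.2))
    = (PySem.List.enumerate operands 0).map (fun p => colF (pre ++ rest) p.1 p.2) := by
  induction rest with
  | nil => intro pre; simp
  | cons line rest ih =>
    intro pre
    rw [List.foldl_cons, step_snoc operands pre line, ih (pre ++ [line])]
    simp

theorem sum_math_problems_eq_sum_colF (number_lines : List (List Int)) (operands : List String) :
    sum_math_problems number_lines operands
      = ((PySem.List.enumerate operands 0).map (fun p => colF number_lines p.1 p.2)).sum := by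
  unfold sum_math_problems
  have hf : (PySem.List.enumerate operands 0).foldl (fun result p =>
      if p.2 == "+" then
        result + number_lines.foldl (fun a line => a + (PySem.List.pyGet? line p.1).getD 0) 0
      else
        result + number_lines.foldl (fun m line => m * (PySem.List.pyGet? line p.1).getD 0) 1) 0
    = (PySem.List.enumerate operands 0).foldl (fun result p => result + colF number_lines p.1 p.2) 0 := by
    apply PySem.List.foldl_congr_mem
    intro acc p _
    unfold colF; split <;> rfl
  rw [hf, PySem.List.foldl_add]
  simp

theorem alt_eq_sum_colF (number_lines : List (List Int)) (operands : List String) :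
    sum_math_problems_alt number_lines operands
      = ((PySem.List.enumerate operands 0).map (fun p => colF number_lines p.1 p.2)).sum := by
  unfold sum_math_problems_alt
  have h0 : operands.map (fun op => if op == "+" then (0 : Int) else 1)
      = (PySem.List.enumerate operands 0).map (fun p => colF [] p.1 p.2) := by
    conv_lhs => rw [← PySem.List.map_snd_enumerate operands 0]
    rw [List.map_map]
    apply List.map_congr_left
    intro p _
    simp [colF_nil]
  simp only [h0]
  rw [foldl_step_inv operands number_lines []]
  simp

-- ===== VERDICT (by name: the statement is the Claim_ definition above) =====
theorem sum_math_problems_spec : Claim_equal_sum_math_problems := by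
  intro number_lines operands _ _
  unfold Spec_sum_math_problems
  rw [sum_math_problems_eq_sum_colF, alt_eq_sum_colF]
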